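-- pv_equiv track=rewrite | github.com/jswarburton/advent-of-code-2020 | main/day_06.py | count_anyone_in_group_answer_yes
-- ===== SOURCE A (Python) =====
-- def count_anyone_in_group_answer_yes(input: list) -> int:
--     total = 0
--     seen_in_group = set()
--     for line in input:
--         if not line:
--             total += len(seen_in_group)
--             seen_in_group = set()
--         else:
--             seen_in_group.update(list(line))
--
--     total += len(seen_in_group)
--
--     return total
-- ===== SOURCE B (Python) =====
-- def count_anyone_in_group_answer_yes(input: list) -> int:
--     # First pass: partition lines into groups at blank lines;
--     # second pass: sum the number of distinct characters per group.
--     groups = [[]]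
--     for line in input:
--         if not line:
--             groups.append([])
--         else:
--             groups[-1].append(line)
--     return sum(len(set("".join(group))) for group in groups)
-- ===== Notes on version B (the rewrite author's own statement) =====
-- stated objective: alternative
-- what changed: Replaces A's interleaved running-set-plus-flush accumulation with a two-pass shape: first partition the lines into groups at blank lines, then sum len(set(''.join(group))) over the groups.
import Mathlib
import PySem

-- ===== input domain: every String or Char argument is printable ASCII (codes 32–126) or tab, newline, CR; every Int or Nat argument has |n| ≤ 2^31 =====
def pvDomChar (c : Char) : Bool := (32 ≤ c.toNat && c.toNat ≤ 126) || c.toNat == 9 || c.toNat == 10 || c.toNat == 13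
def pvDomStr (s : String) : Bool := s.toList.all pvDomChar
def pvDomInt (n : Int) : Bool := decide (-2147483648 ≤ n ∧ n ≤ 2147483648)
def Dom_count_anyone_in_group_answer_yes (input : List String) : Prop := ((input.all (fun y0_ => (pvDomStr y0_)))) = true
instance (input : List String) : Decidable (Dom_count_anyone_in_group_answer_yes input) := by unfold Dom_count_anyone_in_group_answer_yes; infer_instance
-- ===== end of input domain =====

-- B partitions the lines into groups at blank lines first, then sums the distinct-character
-- count of each group, instead of A's interleaved running-set-and-flush accumulation.


-- ===== PORT A =====
-- loop state: (total, seen_in_group); 'not line' on a string is 'line = ""'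
def count_anyone_in_group_answer_yes (input : List String) : Int :=
  let st := input.foldl
    (fun (ts : Int × PySem.Set Char) line =>
      if line = "" then (ts.1 + PySem.Set.len ts.2, PySem.Set.empty)
      else (ts.1, PySem.Set.update ts.2 line.toList))
    (0, PySem.Set.empty)
  st.1 + PySem.Set.len st.2

-- ===== PORT B =====
-- one step of B's partition loop: blank line starts a fresh group, otherwise append to the last
def pvStepB (gs : List (List String)) (line : String) : List (List String) :=
  if line = "" then gs ++ [[]] else gs.dropLast ++ [gs.getLastD [] ++ [line]]

def count_anyone_in_group_answer_yes_alt (input : List String) : Int :=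
  let groups := input.foldl pvStepB [[]]
  (groups.map (fun g =>
    PySem.Set.len (PySem.Set.ofList (PySem.Str.join "" g).toList))).sum

-- ===== PRECONDITION & SPEC =====
def Spec_count_anyone_in_group_answer_yes (input : List String) (out : Int) : Prop := out = count_anyone_in_group_answer_yes_alt input
instance (input : List String) (out : Int) : Decidable (Spec_count_anyone_in_group_answer_yes input out) := by unfold Spec_count_anyone_in_group_answer_yes; infer_instance

-- ===== CLAIM (what is proved, stated in full; the proofs are below) =====
def Claim_equal_count_anyone_in_group_answer_yes : Prop := ∀ (input : List String), Dom_count_anyone_in_group_answer_yes input → Spec_count_anyone_in_group_answer_yes input (count_anyone_in_group_answer_yes input)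

-- ===== LEMMAS AND PROOFS =====

-- distinct-character count of one group (chars taken as the flattened lines)
def pvSetLen (g : List String) : Int :=
  PySem.Set.len (PySem.Set.ofList (g.flatMap String.toList))

-- sum over groups, with the first group still carrying the running set s
def pvSumG (s : PySem.Set Char) : List (List String) → Int
  | [] => 0
  | g :: gs => PySem.Set.len (PySem.Set.update s (g.flatMap String.toList)) + (gs.map pvSetLen).sum

theorem pv_chars_join_nil (l : List (List Char)) : PySem.Chars.join [] l = l.flatten := by
  induction l with
  | nil => simp [PySem.Chars.join_nil]
  | cons a l ih =>
    cases l with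
    | nil => simp [PySem.Chars.join_singleton]
    | cons b r => simp only [PySem.Chars.join_cons_cons, ih, List.flatten_cons]; simp

theorem pv_join_toList (g : List String) :
    (PySem.Str.join "" g).toList = g.flatMap String.toList := by
  rw [PySem.Str.toList_join]
  simp [pv_chars_join_nil, List.flatMap_def]

theorem pv_stepB_ne_nil (gs : List (List String)) (l : String) (_h : gs ≠ []) :
    pvStepB gs l ≠ [] := by
  unfold pvStepB; split <;> simp

theorem pv_foldB_ne_nil (ls : List String) (gs : List (List String)) (h : gs ≠ []) :
    ls.foldl pvStepB gs ≠ [] := by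
  induction ls generalizing gs with
  | nil => simpa
  | cons l ls ih => simpa using ih _ (pv_stepB_ne_nil gs l h)

theorem pv_foldB_prefix (ls : List String) (gs hs : List (List String)) (h : hs ≠ []) :
    ls.foldl pvStepB (gs ++ hs) = gs ++ ls.foldl pvStepB hs := by
  induction ls generalizing hs with
  | nil => simp
  | cons l ls ih =>
    have hstep : pvStepB (gs ++ hs) l = gs ++ pvStepB hs l := by
      unfold pvStepB
      split
      · simp
      · rw [List.dropLast_append_of_ne_nil h]
        simp [List.getLastD_eq_getLast?, List.getLast?_append_of_ne_nil _ h]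
    simp only [List.foldl_cons, hstep, ih _ (pv_stepB_ne_nil hs l h)]

theorem pv_foldB_prepend (ls : List String) (g h : List String) :
    ls.foldl pvStepB [g ++ h]
      = (g ++ (ls.foldl pvStepB [h]).headD []) :: (ls.foldl pvStepB [h]).tail := by
  induction ls generalizing h with
  | nil => simp
  | cons l ls ih =>
    by_cases hl : l = ""
    · subst hl
      have e1 : pvStepB [g ++ h] "" = [g ++ h] ++ [[]] := by unfold pvStepB; simp
      have e2 : pvStepB [h] "" = [h] ++ [[]] := by unfold pvStepB; simp
      simp only [List.foldl_cons, e1, e2,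
        pv_foldB_prefix ls [g ++ h] [[]] (by simp),
        pv_foldB_prefix ls [h] [[]] (by simp)]
      simp
    · have e1 : pvStepB [g ++ h] l = [g ++ (h ++ [l])] := by unfold pvStepB; simp [hl]
      have e2 : pvStepB [h] l = [h ++ [l]] := by unfold pvStepB; simp [hl]
      simp only [List.foldl_cons, e1, e2, ih (h ++ [l])]

theorem pv_sumG_empty (F : List (List String)) (hF : F ≠ []) :
    pvSumG PySem.Set.empty F = (F.map pvSetLen).sum := by
  cases F with
  | nil => exact absurd rfl hF
  | cons g gs =>
    simp [pvSumG, pvSetLen, PySem.Set.ofList_eq_foldl, PySem.Set.update, PySem.Set.empty]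

theorem pv_main (ls : List String) (t : Int) (s : PySem.Set Char) :
    (ls.foldl
      (fun (ts : Int × PySem.Set Char) line =>
        if line = "" then (ts.1 + PySem.Set.len ts.2, PySem.Set.empty)
        else (ts.1, PySem.Set.update ts.2 line.toList))
      (t, s)).1
    + PySem.Set.len (ls.foldl
      (fun (ts : Int × PySem.Set Char) line =>
        if line = "" then (ts.1 + PySem.Set.len ts.2, PySem.Set.empty)
        else (ts.1, PySem.Set.update ts.2 line.toList))
      (t, s)).2
    = t + pvSumG s (ls.foldl pvStepB [[]]) := by
  induction ls generalizing t s with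
  | nil => simp [pvSumG, PySem.Set.update]
  | cons l ls ih =>
    by_cases hl : l = ""
    · subst hl
      have eB : pvStepB [[]] "" = [[]] ++ [[]] := by unfold pvStepB; simp
      obtain ⟨h, hs, hF⟩ := List.exists_cons_of_ne_nil (pv_foldB_ne_nil ls [[]] (by simp))
      simp only [List.foldl_cons, eB, pv_foldB_prefix ls [[]] [[]] (by simp)]
      rw [ih, hF]
      simp only [List.singleton_append, pvSumG, List.map_cons, List.sum_cons, reduceIte]
      have hemp : PySem.Set.update (PySem.Set.empty : PySem.Set Char) (h.flatMap String.toList)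
          = PySem.Set.ofList (h.flatMap String.toList) := by
        simp [PySem.Set.ofList_eq_foldl, PySem.Set.update, PySem.Set.empty]
      rw [hemp]
      simp [pvSetLen]
      ring
    · have eB : pvStepB [[]] l = [[l]] := by unfold pvStepB; simp [hl]
      obtain ⟨h, hs, hF⟩ := List.exists_cons_of_ne_nil (pv_foldB_ne_nil ls [[]] (by simp))
      have hpre : ls.foldl pvStepB [[l]] = (l :: h) :: hs := by
        have := pv_foldB_prepend ls [l] []
        simpa [hF] using this
      simp only [List.foldl_cons, if_neg hl, eB, hpre]
      rw [ih, hF]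
      simp only [pvSumG, List.flatMap_cons]
      have : PySem.Set.update s (l.toList ++ h.flatMap String.toList)
          = PySem.Set.update (PySem.Set.update s l.toList) (h.flatMap String.toList) := by
        simp [PySem.Set.update, List.foldl_append]
      rw [this]

-- ===== VERDICT (by name: the statement is the Claim_ definition above) =====
theorem count_anyone_in_group_answer_yes_spec : Claim_equal_count_anyone_in_group_answer_yes := by
  intro input _
  unfold Spec_count_anyone_in_group_answer_yes count_anyone_in_group_answer_yes count_anyone_in_group_answer_yes_alt
  show (input.foldl
      (fun (ts : Int × PySem.Set Char) line =>
        if line = "" then (ts.1 + PySem.Set.len ts.2, PySem.Set.empty)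
        else (ts.1, PySem.Set.update ts.2 line.toList)) (0, PySem.Set.empty)).1
    + PySem.Set.len (input.foldl
      (fun (ts : Int × PySem.Set Char) line =>
        if line = "" then (ts.1 + PySem.Set.len ts.2, PySem.Set.empty)
        else (ts.1, PySem.Set.update ts.2 line.toList)) (0, PySem.Set.empty)).2
    = ((input.foldl pvStepB [[]]).map (fun g =>
        PySem.Set.len (PySem.Set.ofList (PySem.Str.join "" g).toList))).sum
  have hfun : (fun g => PySem.Set.len (PySem.Set.ofList (PySem.Str.join "" g).toList)) = pvSetLen := by
    funext g
    rw [pv_join_toList]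
    rfl
  rw [pv_main, pv_sumG_empty _ (pv_foldB_ne_nil input [[]] (by simp)), hfun]
  ring
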